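-- pv_equiv track=rewrite | github.com/SDF-Ingegneria-2022/smoothPoll | apps/polls_management/classes/schulze_algorithm/schulze.py | _rank_p
-- ===== SOURCE A (Python) =====
-- from collections import defaultdict
--
-- def _rank_p(candidate_names, p):
--     """Ranks the candidates by p."""
--     candidate_wins = defaultdict(list)
--
--     for candidate_name1 in candidate_names:
--         num_wins = 0
--
--         # Compute the number of wins this candidate has over all other candidates.
--         for candidate_name2 in candidate_names:
--             if candidate_name1 == candidate_name2:
--                 continue
--             candidate1_score = p.get((candidate_name1, candidate_name2), 0)
--             candidate2_score = p.get((candidate_name2, candidate_name1), 0)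
--             if candidate1_score > candidate2_score:
--                 num_wins += 1
--
--         candidate_wins[num_wins].append(candidate_name1)
--
--     sorted_wins = sorted(candidate_wins.keys(), reverse=True)
--     return [candidate_wins[num_wins] for num_wins in sorted_wins]
-- ===== SOURCE B (Python) =====
-- def _rank_p(candidate_names, p):
--     """Ranks the candidates by p."""
--     def duel(a, b):
--         # (a's point, b's point) for this unordered pair
--         if a == b:
--             return 0, 0
--         sab = p.get((a, b), 0)
--         sba = p.get((b, a), 0)
--         if sab > sba:
--             return 1, 0
--         if sba > sab:
--             return 0, 1
--         return 0, 0
--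
--     # Build (candidate, wins) pairs back-to-front: each unordered pair of
--     # positions is examined exactly once, awarding the win to whichever side
--     # beats the other.
--     cw = []
--     for head in reversed(candidate_names):
--         w0 = 0
--         new_cw = []
--         for c, w in cw:
--             wh, wc = duel(head, c)
--             w0 += wh
--             new_cw.append((c, w + wc))
--         cw = [(head, w0)] + new_cw
--
--     return [[c for c, w in cw if w == k]
--             for k in sorted({w for _, w in cw}, reverse=True)]
-- ===== Notes on version B (the rewrite author's own statement) =====
-- stated objective: alternative
-- what changed: Instead of A's full n×n directed double loop that counts each candidate's wins separately and buckets them into a defaultdict keyed by win count, B makes one back-to-front pass that examines each unordered pair of positions exactly once (a 'duel' awarding the point to whichever side beats the other) while building a flat (candidate, wins) list, then groups candidates by the sorted distinct win values with filter comprehensions.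
import Mathlib
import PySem

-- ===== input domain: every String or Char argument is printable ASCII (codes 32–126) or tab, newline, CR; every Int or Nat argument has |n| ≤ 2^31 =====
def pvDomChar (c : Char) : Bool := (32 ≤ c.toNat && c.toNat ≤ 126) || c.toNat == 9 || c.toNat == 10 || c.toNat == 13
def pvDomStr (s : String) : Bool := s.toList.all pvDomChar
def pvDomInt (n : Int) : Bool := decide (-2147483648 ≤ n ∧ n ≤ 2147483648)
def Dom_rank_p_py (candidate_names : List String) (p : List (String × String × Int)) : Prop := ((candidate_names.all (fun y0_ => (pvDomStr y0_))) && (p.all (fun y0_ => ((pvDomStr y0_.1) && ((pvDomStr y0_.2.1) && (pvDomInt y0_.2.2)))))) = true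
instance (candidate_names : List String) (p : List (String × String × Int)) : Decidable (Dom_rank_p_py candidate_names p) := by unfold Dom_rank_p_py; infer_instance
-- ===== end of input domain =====

-- B replaces A's full n×n directed double loop + defaultdict buckets by a back-to-front pass
-- that examines each unordered pair of positions once (a 'duel' awarding the win to whichever
-- side beats the other) while building the (candidate, wins) pairs, then groups by the sorted
-- distinct win values with filter comprehensions — an alternative decomposition, same cost.

-- p.get((a, b), 0): first-match lookup in the association list (shared by both ports)
def pvGetP (p : List (String × String × Int)) (a b : String) : Int :=
  match p.find? (fun e => e.1 == a && e.2.1 == b) with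
  | some e => e.2.2
  | none => 0

-- ===== PORT A =====
-- candidate_wins[num_wins] in the final comprehension is ported as getD _ []: every key looked
-- up is a key of the dict, so the defaultdict __getitem__ returns exactly the stored list.
def rank_p_py (candidate_names : List String) (p : List (String × String × Int)) : List (List String) :=
  let candidate_wins : PySem.Dict Int (List String) :=
    candidate_names.foldl (fun d c1 =>
      let num_wins : Int := candidate_names.foldl (fun n c2 =>
        if c1 == c2 then n
        else if pvGetP p c1 c2 > pvGetP p c2 c1 then n + 1 else n) 0
      d.modify num_wins [] (fun l => l ++ [c1])) PySem.Dict.empty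
  let sorted_wins := PySem.List.sorted candidate_wins.keys (fun k => k) true
  sorted_wins.map (fun k => candidate_wins.getD k [])

-- ===== PORT B =====
-- duel(a, b): the points (for a, for b) this unordered pair contributes
def pvDuel (p : List (String × String × Int)) (a b : String) : Int × Int :=
  if a == b then (0, 0)
  else
    let sab := pvGetP p a b
    let sba := pvGetP p b a
    if sab > sba then (1, 0)
    else if sba > sab then (0, 1)
    else (0, 0)

-- one iteration of 'for head in reversed(candidate_names)': duel head against every
-- already-processed (candidate, wins) pair, then prepend (head, its wins)
def pvStepB (p : List (String × String × Int)) (head : String)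
    (cw : List (String × Int)) : List (String × Int) :=
  let r := cw.foldl (fun (st : Int × List (String × Int)) e =>
      let d := pvDuel p head e.1
      (st.1 + d.1, st.2 ++ [(e.1, e.2 + d.2)])) ((0 : Int), ([] : List (String × Int)))
  (head, r.1) :: r.2

def rank_p_py_alt (candidate_names : List String) (p : List (String × String × Int)) : List (List String) :=
  let cw := candidate_names.reverse.foldl (fun cw head => pvStepB p head cw) []
  let ks := PySem.List.sorted (PySem.Set.ofList (cw.map (fun e => e.2))) (fun k => k) true
  ks.map (fun k => (cw.filter (fun e => e.2 == k)).map (fun e => e.1))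

-- ===== PRECONDITION & SPEC =====
def Spec_rank_p_py (candidate_names : List String) (p : List (String × String × Int)) (out : List (List String)) : Prop := out = rank_p_py_alt candidate_names p
instance (candidate_names : List String) (p : List (String × String × Int)) (out : List (List String)) : Decidable (Spec_rank_p_py candidate_names p out) := by unfold Spec_rank_p_py; infer_instance

-- ===== CLAIM (what is proved, stated in full; the proofs are below) =====
def Claim_equal_rank_p_py : Prop := ∀ (candidate_names : List String) (p : List (String × String × Int)), Dom_rank_p_py candidate_names p → Spec_rank_p_py candidate_names p (rank_p_py candidate_names p)

-- ===== LEMMAS AND PROOFS =====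

-- number of wins of c1 against the list cs (the common characterisation of both programs)
def pvNumWins (candidate_names : List String) (p : List (String × String × Int)) (c1 : String) : Int :=
  ((candidate_names.filter (fun c2 =>
      !(c2 == c1) && decide (pvGetP p c1 c2 > pvGetP p c2 c1))).length : Int)

-- A's inner accumulator loop computes pvNumWins
theorem wins_eq (cs : List String) (p : List (String × String × Int)) (c1 : String) :
    cs.foldl (fun n c2 =>
        if c1 == c2 then n
        else if pvGetP p c1 c2 > pvGetP p c2 c1 then n + 1 else n) (0 : Int)
      = pvNumWins cs p c1 := by
  rw [PySem.List.foldl_congr_mem cs _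
      (fun n c2 => if (!(c2 == c1) && decide (pvGetP p c1 c2 > pvGetP p c2 c1)) = true then n + 1 else n) 0
      (by
        intro acc x _
        by_cases h : c1 = x
        · subst h; simp
        · have h1 : (c1 == x) = false := by simp [h]
          have h2 : (x == c1) = false := by simp [Ne.symm h]
          simp [h1, h2])]
  rw [PySem.List.foldl_if_add_one]
  simp [pvNumWins, List.countP_eq_length_filter]

-- the duel's first component is the win indicator for head
theorem duel_fst (p : List (String × String × Int)) (h c : String) :
    (pvDuel p h c).1
      = if (!(c == h) && decide (pvGetP p h c > pvGetP p c h)) then (1 : Int) else 0 := by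
  unfold pvDuel
  by_cases hc : h = c
  · subst hc; simp
  · have h1 : (h == c) = false := by simp [hc]
    have h2 : (c == h) = false := by simp [Ne.symm hc]
    simp only [h1, h2]
    split_ifs <;> simp_all <;> omega

-- the duel's second component is the win indicator for the other side
theorem duel_snd (p : List (String × String × Int)) (h c : String) :
    (pvDuel p h c).2
      = if (!(h == c) && decide (pvGetP p c h > pvGetP p h c)) then (1 : Int) else 0 := by
  unfold pvDuel
  by_cases hc : h = c
  · subst hc; simp
  · have h1 : (h == c) = false := by simp [hc]
    simp only [h1]
    split_ifs <;> simp_all <;> omega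

-- the inner foldl of pvStepB: head's points are a count, each pair gains its duel's second point
theorem stepB_foldl (p : List (String × String × Int)) (h : String) :
    ∀ (cw : List (String × Int)) (a : Int) (acc : List (String × Int)),
      cw.foldl (fun (st : Int × List (String × Int)) e =>
          let d := pvDuel p h e.1
          (st.1 + d.1, st.2 ++ [(e.1, e.2 + d.2)])) (a, acc)
        = (a + ((cw.countP (fun e => !(e.1 == h) && decide (pvGetP p h e.1 > pvGetP p e.1 h))) : Int),
           acc ++ cw.map (fun e => (e.1, e.2 + (pvDuel p h e.1).2)))
  | [], a, acc => by simp
  | e :: rest, a, acc => by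
    simp only [List.foldl_cons, stepB_foldl p h rest, List.countP_cons, List.map_cons]
    refine Prod.ext ?_ (by simp)
    simp only [duel_fst]
    split_ifs <;> simp_all <;> ring

-- the back-to-front pass builds exactly the (candidate, total wins) pairs
theorem build_spec (p : List (String × String × Int)) :
    ∀ cs : List String,
      cs.foldr (fun h cw => pvStepB p h cw) []
        = cs.map (fun c => (c, pvNumWins cs p c))
  | [] => by simp
  | h :: t => by
    rw [List.foldr_cons, build_spec p t]
    simp only [pvStepB, stepB_foldl, List.nil_append, List.map_map, List.countP_map,
      List.map_cons, Function.comp_def]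
    refine List.cons_eq_cons.mpr ⟨?_, ?_⟩
    · -- head's wins: the count over the tail equals pvNumWins over the whole list
      simp [pvNumWins, List.countP_eq_length_filter]
    · -- each tail candidate's wins gain the duel against head
      refine List.map_congr_left ?_
      intro c _
      simp only [duel_snd, pvNumWins, List.filter_cons]
      split_ifs <;> simp_all
  
-- both sides reduce to: for each distinct win value (descending), the candidates with that value
theorem rank_eq (cs : List String) (p : List (String × String × Int)) :
    rank_p_py cs p = rank_p_py_alt cs p := by
  unfold rank_p_py rank_p_py_alt
  rw [List.foldl_reverse, build_spec]
  have hbody : (fun (d : PySem.Dict Int (List String)) c1 =>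
      let num_wins : Int := cs.foldl (fun n c2 =>
        if c1 == c2 then n
        else if pvGetP p c1 c2 > pvGetP p c2 c1 then n + 1 else n) 0
      d.modify num_wins [] (fun l => l ++ [c1]))
      = fun d c1 => d.modify (pvNumWins cs p c1) [] (fun l => l ++ [c1]) := by
    funext d c1
    simp only [wins_eq]
  rw [hbody]
  have hkeys : (cs.foldl (fun d c1 => d.modify (pvNumWins cs p c1) [] (fun l => l ++ [c1]))
      PySem.Dict.empty).keys = PySem.Set.ofList (cs.map (pvNumWins cs p)) := by
    rw [PySem.Dict.keys_foldl_modify_key cs (pvNumWins cs p) [] (fun _ c1 => fun l => l ++ [c1])]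
    simp [PySem.Dict.empty, PySem.Set.update_nil_left]
  have hgetD : ∀ k : Int, (cs.foldl (fun d c1 => d.modify (pvNumWins cs p c1) [] (fun l => l ++ [c1]))
      PySem.Dict.empty).getD k []
      = (cs.filter (fun c => pvNumWins cs p c == k)) := by
    intro k
    have h1 : cs.foldl (fun d c1 => d.modify (pvNumWins cs p c1) [] (fun l => l ++ [c1]))
        PySem.Dict.empty
        = (cs.map (fun c => (pvNumWins cs p c, c))).foldl
            (fun d pr => d.modify pr.1 [] (fun x => x ++ [pr.2])) PySem.Dict.empty := by
      rw [List.foldl_map]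
    rw [h1, PySem.Dict.getD_foldl_modify_append]
    simp [List.filter_map, Function.comp_def]
  simp only [hkeys, hgetD, List.map_map, List.filter_map, Function.comp_def]
  simp

-- ===== VERDICT (by name: the statement is the Claim_ definition above) =====
theorem rank_p_py_spec : Claim_equal_rank_p_py := by
  intro cs p _
  unfold Spec_rank_p_py
  exact rank_eq cs p
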